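-- pv_equiv track=rewrite | github.com/steniodeassis/teste | extended-binary-search/experimental-analysis.py | iterative_binary_search_extension_steps
-- ===== SOURCE A (Python) =====
-- def iterative_binary_search_extension_steps(nums, target):
--     '''
--     Return the start and end index (inclusively)
--     of a target element in a sorted array
--     ------------
--     Parameters:
--     nums: list
--         a sorted array
--     target: int
--         the target value to be found
--     ------------
--     Returns:
--     step_counter: int
--         The number of steps
--     '''
--     step_counter = 0 # define the step counter
--     counter = 0 # track the number of matches
--     result = [] # track the result
--     tracker = [] # track the position of the matches
--
--     # iterate over nums by indexing
--     for i in range(0, len(nums)):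
--         step_counter += 1
--         # if a match, add the match into tracker and increase counter by one
--         if nums[i] == target:
--             tracker.append(i)
--             counter += 1
--             step_counter += 3
--     # if there was no match return None
--     if counter == 0:
--         step_counter += 2
--         return step_counter
--     # otherwise append the first and last position match with the number of matches into result and return it
--     else:
--         step_counter += 4
--         result.append(tracker[0])
--         result.append(tracker[-1])
--         result.append(counter)
--         return step_counter
-- ===== SOURCE B (Python) =====
-- def iterative_binary_search_extension_steps(nums, target):
--     count = nums.count(target)
--     return len(nums) + 3 * count + (2 if count == 0 else 4)
-- ===== Notes on version B (the rewrite author's own statement) =====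
-- stated objective: simpler
-- what changed: Replaces the index loop with its state machine (step counter, match counter, tracker/result lists) by a closed-form: step count = len(nums) + 3*count(target) + (2 if no match else 4), with the count taken by list.count.
import Mathlib
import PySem

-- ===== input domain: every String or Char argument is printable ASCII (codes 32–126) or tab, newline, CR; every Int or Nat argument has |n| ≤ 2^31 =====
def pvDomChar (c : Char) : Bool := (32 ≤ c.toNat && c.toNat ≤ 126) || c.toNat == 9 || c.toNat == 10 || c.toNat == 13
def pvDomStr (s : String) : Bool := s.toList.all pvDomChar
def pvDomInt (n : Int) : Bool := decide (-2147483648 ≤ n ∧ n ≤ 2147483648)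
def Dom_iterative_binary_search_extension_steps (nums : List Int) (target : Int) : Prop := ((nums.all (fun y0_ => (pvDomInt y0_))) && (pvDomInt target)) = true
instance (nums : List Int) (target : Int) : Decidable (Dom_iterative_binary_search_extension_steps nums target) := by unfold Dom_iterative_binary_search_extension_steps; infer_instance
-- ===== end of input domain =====

-- B replaces A's index loop and its bookkeeping state (step counter, match counter, tracker/result
-- lists) by the closed-form step count len(nums) + 3*count(target) + (2 if no match else 4): simpler.


-- ===== PORT A =====
-- state = (step_counter, counter, tracker); the loop 'for i in range(0, len(nums))'
def iterative_binary_search_extension_steps (nums : List Int) (target : Int) : Int :=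
  let st := (PySem.List.pyRange 0 (PySem.List.len nums) 1).foldl
    (fun (s : Int × Int × List Int) i =>
      let s1 := (s.1 + 1, s.2.1, s.2.2)
      if PySem.List.pyGetD nums i 0 == target then
        (s1.1 + 3, s1.2.1 + 1, s1.2.2 ++ [i])
      else s1)
    (0, 0, [])
  if st.2.1 == 0 then
    st.1 + 2
  else
    -- result = [tracker[0], tracker[-1], counter]; built by A but never returned (dead local state)
    let _result : List Int :=
      [PySem.List.pyGetD st.2.2 0 0, PySem.List.pyGetD st.2.2 (-1) 0, st.2.1]
    st.1 + 4

-- ===== PORT B =====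
def iterative_binary_search_extension_steps_alt (nums : List Int) (target : Int) : Int :=
  let count : Int := PySem.List.count nums target
  PySem.List.len nums + 3 * count + (if count == 0 then 2 else 4)

-- ===== PRECONDITION & SPEC =====
def Spec_iterative_binary_search_extension_steps (nums : List Int) (target : Int) (out : Int) : Prop := out = iterative_binary_search_extension_steps_alt nums target
instance (nums : List Int) (target : Int) (out : Int) : Decidable (Spec_iterative_binary_search_extension_steps nums target out) := by unfold Spec_iterative_binary_search_extension_steps; infer_instance

-- ===== CLAIM (what is proved, stated in full; the proofs are below) =====
def Claim_equal_iterative_binary_search_extension_steps : Prop := ∀ (nums : List Int) (target : Int), Dom_iterative_binary_search_extension_steps nums target → Spec_iterative_binary_search_extension_steps nums target (iterative_binary_search_extension_steps nums target)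

-- ===== LEMMAS AND PROOFS =====

-- the tracker component does not influence the (step_counter, counter) components of A's loop
theorem pv_proj (nums : List Int) (target : Int) (idxs : List Int) :
    ∀ (s c : Int) (t : List Int),
      (idxs.foldl
        (fun (s : Int × Int × List Int) i =>
          let s1 := (s.1 + 1, s.2.1, s.2.2)
          if PySem.List.pyGetD nums i 0 == target then
            (s1.1 + 3, s1.2.1 + 1, s1.2.2 ++ [i])
          else s1)
        (s, c, t)).1 =
      (idxs.foldl
        (fun (p : Int × Int) i =>
          if PySem.List.pyGetD nums i 0 == target then (p.1 + 1 + 3, p.2 + 1)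
          else (p.1 + 1, p.2))
        (s, c)).1 ∧
      (idxs.foldl
        (fun (s : Int × Int × List Int) i =>
          let s1 := (s.1 + 1, s.2.1, s.2.2)
          if PySem.List.pyGetD nums i 0 == target then
            (s1.1 + 3, s1.2.1 + 1, s1.2.2 ++ [i])
          else s1)
        (s, c, t)).2.1 =
      (idxs.foldl
        (fun (p : Int × Int) i =>
          if PySem.List.pyGetD nums i 0 == target then (p.1 + 1 + 3, p.2 + 1)
          else (p.1 + 1, p.2))
        (s, c)).2 := by
  induction idxs with
  | nil => intro s c t; exact ⟨rfl, rfl⟩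
  | cons i rest ih =>
      intro s c t
      simp only [List.foldl_cons]
      by_cases h : PySem.List.pyGetD nums i 0 == target
      · simp only [h, if_pos]
        simpa using ih (s + 1 + 3) (c + 1) (t ++ [i])
      · simp only [h, if_neg, Bool.false_eq_true, not_false_iff]
        simpa using ih (s + 1) c t

-- the element-indexed fold computes (s + len + 3*count, c + count)
theorem pv_count (target : Int) (xs : List Int) :
    ∀ (s c : Int),
      xs.foldl
        (fun (p : Int × Int) x =>
          if x == target then (p.1 + 1 + 3, p.2 + 1) else (p.1 + 1, p.2))
        (s, c) =
      (s + PySem.List.len xs + 3 * (xs.count target : Int), c + (xs.count target : Int)) := by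
  induction xs with
  | nil => intro s c; simp [PySem.List.len]
  | cons x rest ih =>
      intro s c
      by_cases h : x = target
      · subst h
        simp only [List.foldl_cons, beq_self_eq_true, if_pos, ih, List.count_cons_self,
          PySem.List.len_eq, Prod.mk.injEq, List.length_cons]
        push_cast
        constructor <;> omega
      · have hb : (x == target) = false := by simp [h]
        have hcnt : (x :: rest).count target = rest.count target := by
          simp [List.count_cons, hb]
        simp only [List.foldl_cons, hb, Bool.false_eq_true, if_neg, not_false_iff, ih,
          hcnt, PySem.List.len_eq, Prod.mk.injEq, List.length_cons]
        push_cast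
        exact ⟨by omega, trivial⟩

-- ===== VERDICT (by name: the statement is the Claim_ definition above) =====
theorem iterative_binary_search_extension_steps_spec : Claim_equal_iterative_binary_search_extension_steps := by
  intro nums target _
  unfold Spec_iterative_binary_search_extension_steps
  unfold iterative_binary_search_extension_steps iterative_binary_search_extension_steps_alt
  obtain ⟨h1, h2⟩ := pv_proj nums target (PySem.List.pyRange 0 (PySem.List.len nums) 1) 0 0 []
  simp only [h1, h2]
  rw [PySem.List.foldl_pyRange_zero_pyGetD nums 0
    (fun (p : Int × Int) x => if x == target then (p.1 + 1 + 3, p.2 + 1) else (p.1 + 1, p.2)) (0, 0)]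
  rw [pv_count target nums 0 0]
  simp only [zero_add]
  by_cases hc : nums.count target = 0
  · simp [hc]
  · have hb : (((nums.count target : Nat) : Int) == 0) = false := by
      simp [Int.natCast_eq_zero, hc]
    simp [hb]
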